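-- pv_equiv track=rewrite | github.com/hazemAI/Arabic-Lip-Reading-testing-public | model/postprocess.py | unsupervised_cleaning
-- ===== SOURCE A (Python) =====
-- def clean_indices(seq, sos_idx, eos_idx):
--     """
--     Remove sos tokens, truncate at the first eos, return cleaned indices.
--     """
--     cleaned = []
--     for idx in seq:
--         # stop at eos
--         if idx == eos_idx:
--             break
--         # skip sos
--         if idx != sos_idx:
--             cleaned.append(idx)
--     return cleaned
--
-- def remove_consecutive_repeats_dp(seq):
--     """
--     Remove one instance of the largest adjacent repeated subsequence in seq.
--     """
--     n = len(seq)
--     # search for the largest block length L where seq[i:i+L] == seq[i+L:i+2*L]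
--     for L in range(n // 2, 1, -1):
--         for i in range(0, n - 2*L + 1):
--             if seq[i:i+L] == seq[i+L:i+2*L]:
--                 # remove the second occurrence
--                 return seq[:i+L] + seq[i+2*L:]
--     return seq
--
-- def unsupervised_cleaning(seq, sos_idx, eos_idx, max_repeat=1):
--     """
--     Remove <sos>/<eos> and unsupervised removal of repeated subsequences via DP.
--     """
--     # remove sos/eos markers
--     cleaned = clean_indices(seq, sos_idx, eos_idx)
--     # iteratively remove adjacent repeated subsequences until stable
--     pruned = cleaned
--     while True:
--         next_seq = remove_consecutive_repeats_dp(pruned)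
--         if next_seq == pruned:
--             break
--         pruned = next_seq
--     return pruned
-- ===== SOURCE B (Python) =====
-- def _remove_once(seq):
--     """One pass: find the largest adjacent repeated block with a per-L sliding
--     match-run scan (O(n) per L) instead of slice comparisons, remove its second copy."""
--     n = len(seq)
--     for L in range(n // 2, 1, -1):
--         run = 0
--         for j in range(L, n):
--             if seq[j - L] == seq[j]:
--                 run += 1
--                 if run >= L:
--                     # block seq[j-2L+1 : j-L+1] == seq[j-L+1 : j+1]; drop the second copy
--                     return seq[:j - L + 1] + seq[j + 1:]
--             else:
--                 run = 0
--     return seq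
--
--
-- def unsupervised_cleaning(seq, sos_idx, eos_idx, max_repeat=1):
--     if eos_idx in seq:
--         seq = seq[:seq.index(eos_idx)]
--     cur = [x for x in seq if x != sos_idx]
--     while True:
--         nxt = _remove_once(cur)
--         if len(nxt) == len(cur):
--             break
--         cur = nxt
--     return cur
-- ===== Notes on version B (the rewrite author's own statement) =====
-- stated objective: faster
-- what changed: One removal pass drops the per-(L,i) O(L) slice comparisons and instead, for each block length L, makes a single left-to-right scan keeping a run counter of consecutive positions j with seq[j-L]==seq[j] (run reaching L pinpoints the first repeated block); the sos/eos cleaning becomes cut-at-first-eos then filter, and the fixpoint loop stops on unchanged length instead of list equality.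
import Mathlib
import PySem

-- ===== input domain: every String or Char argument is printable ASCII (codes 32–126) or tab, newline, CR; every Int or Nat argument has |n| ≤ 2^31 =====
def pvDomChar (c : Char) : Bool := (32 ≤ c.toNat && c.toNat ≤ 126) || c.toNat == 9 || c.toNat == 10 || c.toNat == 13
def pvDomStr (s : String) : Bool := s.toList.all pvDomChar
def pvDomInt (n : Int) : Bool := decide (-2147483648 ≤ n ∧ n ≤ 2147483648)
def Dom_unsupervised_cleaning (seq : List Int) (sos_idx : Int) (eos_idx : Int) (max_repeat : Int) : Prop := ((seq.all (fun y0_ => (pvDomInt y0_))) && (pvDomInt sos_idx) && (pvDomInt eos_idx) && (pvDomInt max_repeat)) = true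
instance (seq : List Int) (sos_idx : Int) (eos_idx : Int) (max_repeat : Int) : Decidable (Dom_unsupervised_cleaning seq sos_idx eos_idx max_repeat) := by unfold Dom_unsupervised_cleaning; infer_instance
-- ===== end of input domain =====

-- B replaces A's per-(L,i) slice comparisons by a per-L sliding match-run scan
-- (O(n^2) per pass instead of O(n^3)) and cuts/filters the sos/eos markers in two
-- passes instead of one loop; objective: faster.

-- ===== PORT A =====
-- clean_indices: loop over seq, break at eos, skip sos, append the rest
def pvCleanA (seq : List Int) (sos eos : Int) : List Int :=
  match seq with
  | [] => []
  | x :: xs =>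
    if x == eos then []
    else if x != sos then x :: pvCleanA xs sos eos
    else pvCleanA xs sos eos

-- remove_consecutive_repeats_dp: for L in range(n//2, 1, -1): for i in range(0, n-2L+1):
--   if seq[i:i+L] == seq[i+L:i+2L]: return seq[:i+L] + seq[i+2L:]; fall through to seq
def pvRemoveA (s : List Int) : List Int :=
  match (PySem.List.pyRange (PySem.Int.floordiv (s.length : Int) 2) 1 (-1)).findSome? (fun L =>
      ((PySem.List.pyRange 0 ((s.length : Int) - 2*L + 1) 1).find? (fun i =>
          PySem.List.slice s (some i) (some (i + L)) ==
          PySem.List.slice s (some (i + L)) (some (i + 2*L)))).map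
        (fun i => PySem.List.slice s none (some (i + L)) ++
                  PySem.List.slice s (some (i + 2*L)) none)) with
  | some r => r
  | none => s

-- the while-True fixpoint loop; the fuel (length + 1) only makes it total: each
-- productive step strictly shortens the list, so the fuel never runs out
def pvLoopA : Nat → List Int → List Int
  | 0, cur => cur
  | fuel + 1, cur =>
    let nxt := pvRemoveA cur
    if nxt == cur then cur else pvLoopA fuel nxt

def unsupervised_cleaning (seq : List Int) (sos_idx : Int) (eos_idx : Int) (max_repeat : Int) : List Int :=
  let cleaned := pvCleanA seq sos_idx eos_idx
  pvLoopA (cleaned.length + 1) cleaned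

-- ===== PORT B =====
-- per-L scan: run counts consecutive j with seq[j-L] == seq[j]; run >= L means
-- seq[j-2L+1:j-L+1] == seq[j-L+1:j+1], so remove the second copy
def pvScanB (s : List Int) (L : Int) : List Int → Int → Option (List Int)
  | [], _ => none
  | j :: js, run =>
    if PySem.List.pyGet? s (j - L) == PySem.List.pyGet? s j then
      if L ≤ run + 1 then
        some (PySem.List.slice s none (some (j - L + 1)) ++
              PySem.List.slice s (some (j + 1)) none)
      else pvScanB s L js (run + 1)
    else pvScanB s L js 0

def pvRemoveB (s : List Int) : List Int :=
  match (PySem.List.pyRange (PySem.Int.floordiv (s.length : Int) 2) 1 (-1)).findSome? (fun L =>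
      pvScanB s L (PySem.List.pyRange L (s.length : Int) 1) 0) with
  | some r => r
  | none => s

-- cut at the first eos (if any), then filter out sos
def pvCleanB (seq : List Int) (sos eos : Int) : List Int :=
  let s' := match PySem.List.index? seq eos with
            | some k => PySem.List.slice seq none (some (k : Int))
            | none => seq
  s'.filter (fun x => x != sos)

-- B's fixpoint loop stops when the pass no longer shortens the list
def pvLoopB : Nat → List Int → List Int
  | 0, cur => cur
  | fuel + 1, cur =>
    let nxt := pvRemoveB cur
    if nxt.length == cur.length then cur else pvLoopB fuel nxt

def unsupervised_cleaning_alt (seq : List Int) (sos_idx : Int) (eos_idx : Int) (max_repeat : Int) : List Int :=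
  let cur := pvCleanB seq sos_idx eos_idx
  pvLoopB (cur.length + 1) cur

-- ===== PRECONDITION & SPEC =====
def Spec_unsupervised_cleaning (seq : List Int) (sos_idx : Int) (eos_idx : Int) (max_repeat : Int) (out : List Int) : Prop := out = unsupervised_cleaning_alt seq sos_idx eos_idx max_repeat
instance (seq : List Int) (sos_idx : Int) (eos_idx : Int) (max_repeat : Int) (out : List Int) : Decidable (Spec_unsupervised_cleaning seq sos_idx eos_idx max_repeat out) := by unfold Spec_unsupervised_cleaning; infer_instance

-- ===== CLAIM (what is proved, stated in full; the proofs are below) =====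
def Claim_equal_unsupervised_cleaning : Prop := ∀ (seq : List Int) (sos_idx : Int) (eos_idx : Int) (max_repeat : Int), Dom_unsupervised_cleaning seq sos_idx eos_idx max_repeat → Spec_unsupervised_cleaning seq sos_idx eos_idx max_repeat (unsupervised_cleaning seq sos_idx eos_idx max_repeat)

-- ===== LEMMAS AND PROOFS =====

-- pair test at position q: s[q] == s[q+LN]
def pvM (s : List Int) (LN q : Nat) : Bool := s.getD q 0 == s.getD (q + LN) 0

-- window test at start i: s[i:i+LN] == s[i+LN:i+2LN], pointwise
def pvW (s : List Int) (LN i : Nat) : Bool := (List.range LN).all (fun t => pvM s LN (i + t))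

-- the value of one removal pass, Nat-level
def pvRes (s : List Int) (LN i : Nat) : List Int := s.take (i + LN) ++ s.drop (i + 2*LN)

def pvRefFind (s : List Int) (LN : Nat) : Option (List Int) :=
  ((List.range (s.length - 2*LN + 1)).find? (pvW s LN)).map (pvRes s LN)

lemma pv_find?_congr {α : Type} {l : List α} {p q : α → Bool}
    (h : ∀ x ∈ l, p x = q x) : l.find? p = l.find? q := by
  induction l with
  | nil => rfl
  | cons a t ih =>
    simp only [List.find?_cons, h a (by simp)]
    cases q a <;> simp [ih (fun x hx => h x (by simp [hx]))]

lemma pv_findSome?_congr {α β : Type} {l : List α} {f g : α → Option β}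
    (h : ∀ x ∈ l, f x = g x) : l.findSome? f = l.findSome? g := by
  induction l with
  | nil => rfl
  | cons a t ih =>
    simp only [List.findSome?_cons, h a (by simp)]
    cases g a <;> simp [ih (fun x hx => h x (by simp [hx]))]

lemma pv_find?_range_eq_some {p : Nat → Bool} {k i0 : Nat}
    (h1 : i0 < k) (h2 : p i0 = true) (h3 : ∀ i, i < i0 → p i = false) :
    (List.range k).find? p = some i0 := by
  rw [List.find?_eq_some_iff_getElem]
  refine ⟨h2, i0, by simpa using h1, by simp, ?_⟩
  intro j hj
  simpa using h3 _ (by simpa using hj)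

-- slice equality is the pointwise window test
lemma pv_sliceEq_eq_W (s : List Int) (LN i : Nat) (h : i + 2*LN ≤ s.length) :
    ((s.drop i).take LN == (s.drop (i + LN)).take LN) = pvW s LN i := by
  rw [Bool.eq_iff_iff, beq_iff_eq]
  have l1 : ((s.drop i).take LN).length = LN := by simp; omega
  have l2 : ((s.drop (i + LN)).take LN).length = LN := by simp; omega
  have key : ∀ t (ht : t < LN),
      (((s.drop i).take LN)[t]'(by omega) = ((s.drop (i+LN)).take LN)[t]'(by omega)) ↔ (pvM s LN (i + t) = true) := by
    intro t ht
    rw [List.getElem_take, List.getElem_drop, List.getElem_take, List.getElem_drop]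
    simp only [pvM, beq_iff_eq]
    rw [List.getD_eq_getElem _ _ (by omega), List.getD_eq_getElem _ _ (by omega)]
    constructor
    · intro he; convert he using 2; omega
    · intro he; convert he using 2; omega
  rw [List.ext_getElem_iff]
  simp only [pvW, List.all_eq_true, List.mem_range, l1, l2]
  constructor
  · rintro ⟨-, hp⟩ t ht
    exact (key t ht).mp (hp t ht ht)
  · intro hp
    refine ⟨by simp, ?_⟩
    intro t h1 h2
    have ht : t < LN := by simpa using h1
    exact (key t ht).mpr (hp t (by omega))

-- A's inner double loop over i for a fixed L computes pvRefFind
lemma pv_innerA_eq (s : List Int) (LN : Nat) (hn : 2*LN ≤ s.length) :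
    ((PySem.List.pyRange 0 ((s.length : Int) - 2*(LN : Int) + 1) 1).find? (fun i =>
        PySem.List.slice s (some i) (some (i + (LN : Int))) ==
        PySem.List.slice s (some (i + (LN : Int))) (some (i + 2*(LN : Int))))).map
      (fun i => PySem.List.slice s none (some (i + (LN : Int))) ++
                PySem.List.slice s (some (i + 2*(LN : Int))) none)
    = pvRefFind s LN := by
  have hM : ((s.length : Int) - 2*(LN : Int) + 1) = ((s.length - 2*LN + 1 : Nat) : Int) := by
    push_cast; omega
  rw [hM, PySem.List.pyRange_zero_natCast, List.find?_map]
  rw [Option.map_map]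
  have hcong : (List.range (s.length - 2*LN + 1)).find?
      ((fun i => PySem.List.slice s (some i) (some (i + (LN : Int))) ==
        PySem.List.slice s (some (i + (LN : Int))) (some (i + 2*(LN : Int)))) ∘ (fun k : Nat => (k : Int)))
      = (List.range (s.length - 2*LN + 1)).find? (pvW s LN) := by
    apply pv_find?_congr
    intro i hi
    simp only [List.mem_range] at hi
    simp only [Function.comp]
    have c1 : ((i : Int) + (LN : Int)) = (((i + LN : Nat)) : Int) := by push_cast; ring
    have c2 : ((i : Int) + 2*(LN : Int)) = (((i + LN : Nat)) : Int) + ((LN : Nat) : Int) := by push_cast; ring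
    rw [PySem.List.slice_natCast_add s i LN]
    rw [c1, c2, PySem.List.slice_natCast_add s (i + LN) LN]
    exact pv_sliceEq_eq_W s LN i (by omega)
  rw [hcong]
  unfold pvRefFind
  cases hf : (List.range (s.length - 2*LN + 1)).find? (pvW s LN) with
  | none => simp
  | some i =>
    simp only [Option.map_some]
    congr 1
    simp only [Function.comp]
    unfold pvRes
    have c1 : ((i : Int) + (LN : Int)) = (((i + LN : Nat)) : Int) := by push_cast; ring
    have c2 : ((i : Int) + 2*(LN : Int)) = (((i + 2*LN : Nat)) : Int) := by push_cast; ring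
    rw [c1, c2, PySem.List.slice_to_natCast, PySem.List.slice_from_natCast]

-- B's run scan for a fixed L computes pvRefFind (sliding-window invariant)
lemma pv_scan_eq (s : List Int) (LN : Nat) (h2 : 2 ≤ LN) (hn : 2*LN ≤ s.length) :
    ∀ (fuel q r : Nat), q + LN + fuel = s.length →
      r < LN → r ≤ q →
      (∀ t, t < r → pvM s LN (q - 1 - t) = true) →
      (r = q ∨ pvM s LN (q - r - 1) = false) →
      (∀ i, i + LN ≤ q → pvW s LN i = false) →
      pvScanB s (LN : Int) (PySem.List.pyRange ((q + LN : Nat) : Int) ((s.length : Int)) 1) (r : Int)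
        = pvRefFind s LN := by
  intro fuel
  induction fuel with
  | zero =>
    intro q r hq hr1 hr2 _ _ hw
    rw [PySem.List.pyRange_one_eq_nil (by push_cast; omega)]
    rw [pvScanB]
    unfold pvRefFind
    rw [List.find?_eq_none.mpr]
    · rfl
    · intro i hi
      simp only [List.mem_range] at hi
      simp [hw i (by omega)]
  | succ fuel ih =>
    intro q r hq hr1 hr2 hstreak hmax hw
    have hqn : q + LN < s.length := by omega
    rw [PySem.List.pyRange_one_cons (by exact_mod_cast hqn)]
    rw [pvScanB]
    have e1 : ((q + LN : Nat) : Int) - (LN : Int) = ((q : Nat) : Int) := by push_cast; ring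
    have e2 : PySem.List.pyGet? s ((q : Nat) : Int) = some (s[q]'(by omega)) := by
      rw [PySem.List.pyGet?_natCast]; exact List.getElem?_eq_getElem _
    have e3 : PySem.List.pyGet? s ((q + LN : Nat) : Int) = some (s[q + LN]'(by omega)) := by
      rw [PySem.List.pyGet?_natCast]; exact List.getElem?_eq_getElem _
    have hmeq : (PySem.List.pyGet? s (((q + LN : Nat) : Int) - (LN : Int)) ==
        PySem.List.pyGet? s ((q + LN : Nat) : Int)) = pvM s LN q := by
      rw [e1, e2, e3]
      simp only [pvM]
      rw [List.getD_eq_getElem _ _ (by omega), List.getD_eq_getElem _ _ (by omega)]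
      simp
    rw [hmeq]
    by_cases hm : pvM s LN q = true
    · rw [hm]
      simp only [if_true]
      by_cases hr : LN ≤ r + 1
      · -- trigger: r + 1 = LN, the window ending at q is the first full match
        rw [if_pos (by exact_mod_cast hr)]
        set i0 := q + 1 - LN with hi0
        have hW : pvW s LN i0 = true := by
          simp only [pvW, List.all_eq_true, List.mem_range]
          intro t ht
          by_cases hlast : t = LN - 1
          · have e : i0 + t = q := by omega
            rw [e]; exact hm
          · have e : i0 + t = q - 1 - (LN - 2 - t) := by omega
            rw [e]; exact hstreak _ (by omega)
        have hfind : (List.range (s.length - 2*LN + 1)).find? (pvW s LN) = some i0 :=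
          pv_find?_range_eq_some (by omega) hW (fun i hi => hw i (by omega))
        unfold pvRefFind
        rw [hfind]
        simp only [Option.map_some]
        congr 1
        have c1 : ((q + LN : Nat) : Int) - (LN : Int) + 1 = (((q + 1 : Nat)) : Int) := by push_cast; ring
        have c2 : ((q + LN : Nat) : Int) + 1 = (((q + LN + 1 : Nat)) : Int) := by push_cast; ring
        rw [c1, c2, PySem.List.slice_to_natCast, PySem.List.slice_from_natCast]
        unfold pvRes
        have d1 : i0 + LN = q + 1 := by omega
        have d2 : i0 + 2*LN = q + LN + 1 := by omega
        rw [d1, d2]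
      · -- a match, but the run is still shorter than L
        rw [if_neg (by exact_mod_cast hr)]
        have estep : ((q + LN : Nat) : Int) + 1 = (((q + 1) + LN : Nat) : Int) := by push_cast; ring
        have erun : ((r : Nat) : Int) + 1 = (((r + 1 : Nat)) : Int) := by push_cast; ring
        rw [estep, erun]
        apply ih (q + 1) (r + 1) (by omega) (by omega) (by omega)
        · intro t ht
          rcases Nat.eq_zero_or_pos t with h0 | h0
          · subst h0; simpa using hm
          · have e : q + 1 - 1 - t = q - 1 - (t - 1) := by omega
            rw [e]; exact hstreak (t - 1) (by omega)
        · rcases hmax with h | h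
          · exact Or.inl (by omega)
          · refine Or.inr ?_
            have e : q + 1 - (r + 1) - 1 = q - r - 1 := by omega
            rw [e]; exact h
        · intro i hi
          rcases Nat.lt_or_ge (i + LN) (q + 1) with hlt | hge
          · exact hw i (by omega)
          · -- i + LN = q + 1: this window contains the mismatch at q - r - 1
            have hiq : i + LN = q + 1 := by omega
            rcases hmax with hrq | hmf
            · exfalso; omega
            · have hp0 : i ≤ q - r - 1 ∧ q - r - 1 < i + LN ∧ r < q := by
                rcases Nat.lt_or_ge r q with h | h
                · exact ⟨by omega, by omega, h⟩
                · exfalso; omega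
              simp only [pvW, List.all_eq_false]
              refine ⟨q - r - 1 - i, by simp; omega, ?_⟩
              have e : i + (q - r - 1 - i) = q - r - 1 := by omega
              simp [e, hmf]
    · -- mismatch at q: reset the run
      rw [Bool.not_eq_true] at hm
      rw [hm]
      simp only [Bool.false_eq_true, if_false]
      have estep : ((q + LN : Nat) : Int) + 1 = (((q + 1) + LN : Nat) : Int) := by push_cast; ring
      have ezero : (0 : Int) = ((0 : Nat) : Int) := by norm_num
      rw [estep, ezero]
      apply ih (q + 1) 0 (by omega) (by omega) (by omega)
      · intro t ht; omega
      · refine Or.inr ?_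
        have e : q + 1 - 0 - 1 = q := by omega
        rw [e]; exact hm
      · intro i hi
        rcases Nat.lt_or_ge (i + LN) (q + 1) with hlt | hge
        · exact hw i (by omega)
        · have hiq : i + LN = q + 1 := by omega
          simp only [pvW, List.all_eq_false]
          refine ⟨LN - 1, by simp; omega, ?_⟩
          have e : i + (LN - 1) = q := by omega
          simp [e, hm]

lemma pv_innerB_eq (s : List Int) (LN : Nat) (h2 : 2 ≤ LN) (hn : 2*LN ≤ s.length) :
    pvScanB s (LN : Int) (PySem.List.pyRange (LN : Int) ((s.length : Int)) 1) 0
      = pvRefFind s LN := by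
  have := pv_scan_eq s LN h2 hn (s.length - LN) 0 0 (by omega) (by omega) (by omega)
    (by omega) (Or.inl rfl) (by intro i hi; omega)
  simpa using this

-- each L produced by range(n//2, 1, -1) is a Nat with 2 ≤ L and 2L ≤ n
lemma pv_L_bounds (s : List Int) (L : Int)
    (hL : L ∈ PySem.List.pyRange (PySem.Int.floordiv (s.length : Int) 2) 1 (-1)) :
    ∃ LN : Nat, L = (LN : Int) ∧ 2 ≤ LN ∧ 2*LN ≤ s.length := by
  rw [PySem.List.mem_pyRange_neg_one] at hL
  have hfd : PySem.Int.floordiv ((s.length : Nat) : Int) ((2 : Nat) : Int) = ((s.length / 2 : Nat) : Int) :=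
    PySem.Int.floordiv_natCast s.length 2
  refine ⟨L.toNat, (Int.toNat_of_nonneg (by omega)).symm, by omega, ?_⟩
  have h1 : L ≤ ((s.length / 2 : Nat) : Int) := by
    have := hL.2
    rw [show ((2:Nat):Int) = (2:Int) by norm_num] at hfd
    omega
  have h2 : L.toNat ≤ s.length / 2 := by omega
  omega

-- the two removal passes agree
lemma pv_remove_eq (s : List Int) : pvRemoveA s = pvRemoveB s := by
  unfold pvRemoveA pvRemoveB
  suffices h : (PySem.List.pyRange (PySem.Int.floordiv (s.length : Int) 2) 1 (-1)).findSome? (fun L =>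
      ((PySem.List.pyRange 0 ((s.length : Int) - 2*L + 1) 1).find? (fun i =>
          PySem.List.slice s (some i) (some (i + L)) ==
          PySem.List.slice s (some (i + L)) (some (i + 2*L)))).map
        (fun i => PySem.List.slice s none (some (i + L)) ++
                  PySem.List.slice s (some (i + 2*L)) none)) =
      (PySem.List.pyRange (PySem.Int.floordiv (s.length : Int) 2) 1 (-1)).findSome? (fun L =>
      pvScanB s L (PySem.List.pyRange L (s.length : Int) 1) 0) by
    rw [h]
  apply pv_findSome?_congr
  intro L hL
  obtain ⟨LN, rfl, hLN2, hLNn⟩ := pv_L_bounds s L hL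
  rw [pv_innerA_eq s LN hLNn, pv_innerB_eq s LN hLN2 hLNn]

-- a productive pass removes exactly L ≥ 2 elements
lemma pv_remove_len (s : List Int) :
    pvRemoveB s = s ∨ (pvRemoveB s).length + 2 ≤ s.length := by
  unfold pvRemoveB
  cases hfind : (PySem.List.pyRange (PySem.Int.floordiv (s.length : Int) 2) 1 (-1)).findSome? (fun L =>
      pvScanB s L (PySem.List.pyRange L (s.length : Int) 1) 0) with
  | none => exact Or.inl rfl
  | some r =>
    right
    obtain ⟨L, hL, hfL⟩ := List.exists_of_findSome?_eq_some hfind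
    obtain ⟨LN, rfl, hLN2, hLNn⟩ := pv_L_bounds s L hL
    rw [pv_innerB_eq s LN hLN2 hLNn] at hfL
    unfold pvRefFind at hfL
    cases hf2 : (List.range (s.length - 2*LN + 1)).find? (pvW s LN) with
    | none => rw [hf2] at hfL; simp at hfL
    | some i =>
      rw [hf2] at hfL
      have hi : i < s.length - 2*LN + 1 := List.mem_range.mp (List.mem_of_find?_eq_some hf2)
      simp only [Option.map_some, Option.some.injEq] at hfL
      subst hfL
      simp only [pvRes, List.length_append, List.length_take, List.length_drop]
      omega

lemma pv_loop_eq : ∀ (fuel : Nat) (cur : List Int), pvLoopA fuel cur = pvLoopB fuel cur := by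
  intro fuel
  induction fuel with
  | zero => intro cur; rfl
  | succ fuel ih =>
    intro cur
    rw [pvLoopA, pvLoopB]
    simp only [pv_remove_eq cur]
    rcases pv_remove_len cur with h | h
    · simp [h]
    · have hne : pvRemoveB cur ≠ cur := by
        intro he; rw [he] at h; omega
      have hlen : (pvRemoveB cur).length ≠ cur.length := by omega
      simp only [beq_iff_eq]
      rw [if_neg hne, if_neg hlen]
      exact ih _

lemma pv_clean_eq (seq : List Int) (sos eos : Int) :
    pvCleanA seq sos eos = pvCleanB seq sos eos := by
  induction seq with
  | nil => rfl
  | cons x xs ih =>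
    by_cases hx : x = eos
    · subst hx
      unfold pvCleanB
      rw [PySem.List.index?_cons_self]
      have h0 : PySem.List.slice (x :: xs) none (some ((0 : Nat) : Int)) = List.take 0 (x :: xs) :=
        PySem.List.slice_to_natCast _ 0
      simp only [Nat.cast_zero] at h0
      simp [pvCleanA, h0]
    · have hidx := PySem.List.index?_cons_of_ne (x := x) (v := eos) xs hx
      rw [pvCleanA]
      simp only [beq_iff_eq, hx, if_false]
      rw [ih]
      unfold pvCleanB
      rw [hidx]
      cases h : PySem.List.index? xs eos with
      | none => simp [List.filter_cons]
      | some k =>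
        simp only [Option.map_some]
        rw [PySem.List.slice_to_natCast, PySem.List.slice_to_natCast]
        simp [List.filter_cons]

-- ===== VERDICT (by name: the statement is the Claim_ definition above) =====
theorem unsupervised_cleaning_spec : Claim_equal_unsupervised_cleaning := by
  intro seq sos eos mr _
  unfold Spec_unsupervised_cleaning unsupervised_cleaning unsupervised_cleaning_alt
  rw [pv_clean_eq, pv_loop_eq]
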